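-- pv_equiv track=rewrite | github.com/jase-perf/virtual_stream_utility | src/main.py | optimize_paths
-- ===== SOURCE A (Python) =====
-- def optimize_paths(paths):
--     """Optimize the paths to remove redundant entries"""
--     sorted_paths = sorted(paths)
--     optimized = []
--
--     for path in sorted_paths:
--         is_covered = False
--         for opt_path in optimized:
--             if opt_path.endswith('/...'):
--                 folder_prefix = opt_path[:-4] + '/'
--                 if path.startswith(folder_prefix) or path + '/...' == opt_path:
--                     is_covered = True
--                     break
--
--         if not is_covered:
--             optimized.append(path)
--
--     return optimized
-- ===== SOURCE B (Python) =====
-- def optimize_paths(paths):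
--     """Optimize the paths to remove redundant entries"""
--     optimized = []
--     active = None  # the folder prefix of the most recent kept '/...' entry
--     for path in sorted(paths):
--         if active is not None and path.startswith(active):
--             continue
--         optimized.append(path)
--         if path.endswith('/...'):
--             active = path[:-4] + '/'
--     return optimized
-- ===== Notes on version B (the rewrite author's own statement) =====
-- stated objective: faster
-- what changed: Replaces the inner scan of all kept paths by a single pass over the sorted list that tracks only the one active '/...' folder prefix (in sorted order, paths covered by a '/...' entry are contiguous, so only the most recent kept '/...' prefix can cover the current path).
import Mathlib
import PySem

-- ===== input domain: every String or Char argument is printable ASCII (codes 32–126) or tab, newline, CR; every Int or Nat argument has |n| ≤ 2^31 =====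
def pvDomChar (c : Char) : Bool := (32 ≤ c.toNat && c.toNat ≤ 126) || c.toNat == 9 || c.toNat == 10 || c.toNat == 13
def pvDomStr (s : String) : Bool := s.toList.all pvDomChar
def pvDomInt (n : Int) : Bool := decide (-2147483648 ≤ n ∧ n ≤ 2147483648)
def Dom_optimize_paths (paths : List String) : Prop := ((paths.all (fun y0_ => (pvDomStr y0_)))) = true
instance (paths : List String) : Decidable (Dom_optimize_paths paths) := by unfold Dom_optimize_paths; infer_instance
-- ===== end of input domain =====

-- B replaces A's inner scan of all kept paths by a single pass over the sorted list
-- that tracks only the most recently kept '/...' folder prefix (objective: faster).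

-- ===== PORT A =====
-- inner-loop body of A: does opt_path (if it ends with '/...') cover path?
def pvCoveredA (path : String) (opt_path : String) : Bool :=
  PySem.Str.endswith opt_path "/..." &&
    (PySem.Chars.startswith path.toList
        (PySem.Chars.slice opt_path.toList none (some (-4)) ++ ['/'])
      || decide (path.toList ++ ['/', '.', '.', '.'] = opt_path.toList))

-- one iteration of A's outer loop
def pvStepA (optimized : List String) (path : String) : List String :=
  if optimized.any (fun opt_path => pvCoveredA path opt_path) then optimized
  else optimized ++ [path]

def optimize_paths (paths : List String) : List String :=
  (PySem.List.sorted paths (fun x => x)).foldl pvStepA []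

-- ===== PORT B =====
-- 'active is not None and path.startswith(active)'
def pvCovB (act : Option (List Char)) (path : String) : Bool :=
  match act with
  | none => false
  | some q => PySem.Chars.startswith path.toList q

-- B's single pass: acc = kept paths, act = folder prefix of the last kept '/...' entry
def pvAltGo (act : Option (List Char)) (acc : List String) : List String → List String
  | [] => acc
  | p :: rest =>
    if pvCovB act p then pvAltGo act acc rest
    else
      pvAltGo
        (if PySem.Str.endswith p "/..." then
           some (PySem.Chars.slice p.toList none (some (-4)) ++ ['/'])
         else act)
        (acc ++ [p]) rest

def optimize_paths_alt (paths : List String) : List String :=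
  pvAltGo none [] (PySem.List.sorted paths (fun x => x))

-- ===== PRECONDITION & SPEC =====
def Spec_optimize_paths (paths : List String) (out : List String) : Prop := out = optimize_paths_alt paths
instance (paths : List String) (out : List String) : Decidable (Spec_optimize_paths paths out) := by unfold Spec_optimize_paths; infer_instance

-- ===== CLAIM (what is proved, stated in full; the proofs are below) =====
def Claim_equal_optimize_paths : Prop := ∀ (paths : List String), Dom_optimize_paths paths → Spec_optimize_paths paths (optimize_paths paths)

-- ===== LEMMAS AND PROOFS =====

lemma pv_toList_dots : ("/..." : String).toList = ['/', '.', '.', '.'] := rfl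

lemma pv_lex_append (l m : List Char) (h : m ≠ []) : List.Lex (· < ·) l (l ++ m) := by
  induction l with
  | nil =>
    cases m with
    | nil => exact absurd rfl h
    | cons c u => exact List.Lex.nil
  | cons a l ih => exact List.Lex.cons ih

-- a list is strictly below any proper extension of itself
lemma pv_lt_append (l m : List Char) (h : m ≠ []) : l < l ++ m :=
  (List.lt_iff_lex_lt _ _).mpr (pv_lex_append l m h)

lemma pv_prefix_le {l m : List Char} (h : l <+: m) : l ≤ m := by
  obtain ⟨t, rfl⟩ := h
  cases t with
  | nil => simp
  | cons c u => exact le_of_lt (pv_lt_append _ _ (by simp))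

-- if o ends with '/...' then o = o[:-4] ++ "/..."
lemma pv_ends_decomp (o : String) (h : PySem.Str.endswith o "/..." = true) :
    o.toList = PySem.Chars.slice o.toList none (some (-4)) ++ ['/', '.', '.', '.'] := by
  rw [PySem.Str.endswith_eq] at h
  rw [PySem.Chars.endswith_iff] at h
  obtain ⟨u, hu⟩ := h
  rw [pv_toList_dots] at hu
  rw [PySem.Chars.slice_eq_listSlice, PySem.List.slice_to_neg_ofNat o.toList 4 (by omega)]
  rw [← hu]
  simp

-- the folder prefix o[:-4] + '/' is a prefix of o itself
lemma pv_prefix_prefix (o : String) (h : PySem.Str.endswith o "/..." = true) :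
    (PySem.Chars.slice o.toList none (some (-4)) ++ ['/']) <+: o.toList :=
  ⟨['.', '.', '.'], by rw [List.append_assoc]; exact (pv_ends_decomp o h).symm⟩

-- core order fact: if q is lexicographically below p but not a prefix of p,
-- then every string with prefix q is below p
lemma pv_block {q p : List Char} (h2 : List.Lex (· < ·) q p) :
    ¬ q <+: p → ∀ s : List Char, q <+: s → List.Lex (· < ·) s p := by
  induction h2 with
  | @nil a l =>
      intro h1
      exact absurd (List.nil_prefix) h1
  | @rel a b l₁ l₂ hab =>
      intro _ s hs
      obtain ⟨t, rfl⟩ := hs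
      exact List.Lex.rel hab
  | @cons a l₁ l₂ h ih =>
      intro h1 s hs
      obtain ⟨t, rfl⟩ := hs
      have h1' : ¬ l₁ <+: l₂ := by
        intro hp
        obtain ⟨u, rfl⟩ := hp
        exact h1 ⟨u, rfl⟩
      exact List.Lex.cons (ih h1' (l₁ ++ t) (List.prefix_append _ _))

-- the 'path + "/..." == opt_path' disjunct can never fire once opt_path ≤ path
lemma pv_eq_branch_false (r o : String) (hle : o ≤ r) :
    decide (r.toList ++ ['/', '.', '.', '.'] = o.toList) = false := by
  simp only [decide_eq_false_iff_not]
  intro he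
  have h1 : o.toList ≤ r.toList := String.le_iff_toList_le.mp hle
  have h2 : r.toList < r.toList ++ ['/', '.', '.', '.'] := pv_lt_append _ _ (by simp)
  rw [he] at h2
  exact absurd h1 (not_le.mpr h2)

-- if p was not covered by o (which ends '/...') and o ≤ p ≤ r,
-- then r does not start with o's folder prefix either
lemma pv_not_startswith (o p r : String) (ho : PySem.Str.endswith o "/..." = true)
    (hnc : pvCoveredA p o = false) (hop : o ≤ p) (hpr : p ≤ r) :
    PySem.Chars.startswith r.toList
      (PySem.Chars.slice o.toList none (some (-4)) ++ ['/']) = false := by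
  cases hsw : PySem.Chars.startswith r.toList
      (PySem.Chars.slice o.toList none (some (-4)) ++ ['/']) with
  | false => rfl
  | true =>
    exfalso
    have hr : (PySem.Chars.slice o.toList none (some (-4)) ++ ['/']) <+: r.toList :=
      (PySem.Chars.startswith_iff _ _).mp hsw
    have hnp : ¬ (PySem.Chars.slice o.toList none (some (-4)) ++ ['/']) <+: p.toList := by
      intro hp
      have h1 : PySem.Chars.startswith p.toList
          (PySem.Chars.slice o.toList none (some (-4)) ++ ['/']) = true :=
        (PySem.Chars.startswith_iff _ _).mpr hp
      rw [pvCoveredA, ho, Bool.true_and, Bool.or_eq_false_iff] at hnc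
      rw [hnc.1] at h1
      exact absurd h1 (by simp)
    have hqp : (PySem.Chars.slice o.toList none (some (-4)) ++ ['/']) ≤ p.toList :=
      le_trans (pv_prefix_le (pv_prefix_prefix o ho)) (String.le_iff_toList_le.mp hop)
    rcases lt_or_eq_of_le hqp with hlt | heq
    · have hlex := (List.lt_iff_lex_lt _ _).mp hlt
      have hsp := pv_block hlex hnp r.toList hr
      exact absurd (String.le_iff_toList_le.mp hpr)
        (not_le.mpr ((List.lt_iff_lex_lt _ _).mpr hsp))
    · exact hnp (heq ▸ List.prefix_refl _)

-- main loop invariant: A's fold over the sorted tail equals B's pass,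
-- provided coverage by the kept list coincides with coverage by the active prefix
lemma pv_loop (rest : List String) : ∀ (opt : List String) (act : Option (List Char)),
    rest.Pairwise (· ≤ ·) →
    (∀ o ∈ opt, ∀ r ∈ rest, o ≤ r) →
    (∀ r ∈ rest, opt.any (fun o => pvCoveredA r o) = pvCovB act r) →
    rest.foldl pvStepA opt = pvAltGo act opt rest := by
  induction rest with
  | nil => intro opt act _ _ _; rfl
  | cons p t ih =>
    intro opt act hpw hord hcov
    obtain ⟨hp1, hpw'⟩ := List.pairwise_cons.mp hpw
    have hc := hcov p (List.mem_cons_self)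
    rw [List.foldl_cons]
    cases h : opt.any (fun o => pvCoveredA p o) with
    | true =>
      rw [show pvStepA opt p = opt from by simp [pvStepA, h]]
      rw [show pvAltGo act opt (p :: t) = pvAltGo act opt t from by
        simp [pvAltGo, ← hc, h]]
      exact ih opt act hpw' (fun o ho r hr => hord o ho r (List.mem_cons_of_mem _ hr))
        (fun r hr => hcov r (List.mem_cons_of_mem _ hr))
    | false =>
      rw [show pvStepA opt p = opt ++ [p] from by simp [pvStepA, h]]
      rw [show pvAltGo act opt (p :: t) =
          pvAltGo (if PySem.Str.endswith p "/..." then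
              some (PySem.Chars.slice p.toList none (some (-4)) ++ ['/'])
            else act) (opt ++ [p]) t from by
        simp [pvAltGo, ← hc, h]]
      apply ih _ _ hpw'
      · intro o ho r hr
        rcases List.mem_append.mp ho with ho' | ho'
        · exact hord o ho' r (List.mem_cons_of_mem _ hr)
        · rw [List.mem_singleton.mp ho']; exact hp1 r hr
      · intro r hr
        have hpr : p ≤ r := hp1 r hr
        have hanyF : ∀ o ∈ opt, pvCoveredA p o = false := by
          intro o ho
          have := List.any_eq_false.mp h o ho
          simpa using this
        rw [show (opt ++ [p]).any (fun o => pvCoveredA r o) =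
            (opt.any (fun o => pvCoveredA r o) || pvCoveredA r p) from by simp]
        cases hend : PySem.Str.endswith p "/..." with
        | false =>
          have hcp : pvCoveredA r p = false := by rw [pvCoveredA, hend, Bool.false_and]
          rw [hcp, Bool.or_false, hcov r (List.mem_cons_of_mem _ hr)]
          simp
        | true =>
          -- every old kept entry fails to cover r
          have holdF : ∀ o ∈ opt, pvCoveredA r o = false := by
            intro o ho
            cases hoe : PySem.Str.endswith o "/..." with
            | false => rw [pvCoveredA, hoe, Bool.false_and]
            | true =>
              have h1 := pv_not_startswith o p r hoe (hanyF o ho)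
                  (hord o ho p (List.mem_cons_self)) hpr
              have h2 := pv_eq_branch_false r o (hord o ho r (List.mem_cons_of_mem _ hr))
              rw [pvCoveredA, hoe, Bool.true_and, h1, Bool.false_or, h2]
          have hcp : pvCoveredA r p =
              PySem.Chars.startswith r.toList
                (PySem.Chars.slice p.toList none (some (-4)) ++ ['/']) := by
            rw [pvCoveredA, hend, Bool.true_and, pv_eq_branch_false r p hpr, Bool.or_false]
          rw [List.any_eq_false.mpr (fun x hx => by simp [holdF x hx]), Bool.false_or, hcp]
          simp [pvCovB]

-- ===== VERDICT (by name: the statement is the Claim_ definition above) =====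
theorem optimize_paths_spec : Claim_equal_optimize_paths := by
  intro paths _
  unfold Spec_optimize_paths optimize_paths optimize_paths_alt
  apply pv_loop
  · exact PySem.List.sorted_pairwise paths (fun x => x)
  · intro o ho; simp at ho
  · intro r _; rfl
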